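-- pv_equiv track=rewrite | github.com/bcw1997/python_snippets | non_repeat_elements.py | non_repeating
-- ===== SOURCE A (Python) =====
-- def non_repeating(s):
--     s = s.replace(" ", "").lower() # replace spaces, bring to lower case.
--     # Create Dictionary to track Key Value pair
--
--     char_count = {}
--
--     for c in s:
--         if c in char_count:
--             char_count[c] += 1 # add +1 for particular c value
--         else:
--             char_count[c] = 1 # give first occurence for particular c value
--
--
--     uniques = []
--     item_sorter = sorted(char_count.items(),
--                          key = lambda x: x[1])
--
--     for item in item_sorter:
--         if item[1] == item_sorter[0][1]:
--             uniques.append(item)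
--
--     return uniques
-- ===== SOURCE B (Python) =====
-- def non_repeating(s):
--     s = s.replace(" ", "").lower()
--     char_count = {}
--     for c in s:
--         char_count[c] = char_count.get(c, 0) + 1
--     if not char_count:
--         return []
--     m = min(char_count.values())
--     return [(c, n) for c, n in char_count.items() if n == m]
-- ===== Notes on version B (the rewrite author's own statement) =====
-- stated objective: simpler
-- what changed: Replaces the sort-by-count followed by a scan against the sorted head with a direct min over the counts and a single filter of the dict items in insertion order (stable sort ties preserve insertion order, so the output is identical).
import Mathlib
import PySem

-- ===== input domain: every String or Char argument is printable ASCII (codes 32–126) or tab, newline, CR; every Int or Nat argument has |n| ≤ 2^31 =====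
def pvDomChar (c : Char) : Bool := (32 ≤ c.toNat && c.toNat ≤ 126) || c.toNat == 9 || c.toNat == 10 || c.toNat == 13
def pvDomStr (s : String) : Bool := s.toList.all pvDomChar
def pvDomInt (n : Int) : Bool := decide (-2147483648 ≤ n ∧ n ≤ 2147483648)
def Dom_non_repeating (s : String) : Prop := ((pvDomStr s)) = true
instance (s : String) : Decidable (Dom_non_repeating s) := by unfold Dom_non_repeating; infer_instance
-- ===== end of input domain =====

-- B replaces A's sort-by-count + scan against the sorted head with a direct min over the
-- counts and one filter of the dict items in insertion order (same return value everywhere).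

-- ===== PORT A =====
-- A's result loop ('for item in item_sorter: if item[1] == item_sorter[0][1]: uniques.append(item)'),
-- named so the same match-expression can be reasoned about; item_sorter[0] is pyGet? (none unreachable: the body only runs when item_sorter is nonempty)
def pvLoopA (item_sorter : List (String × Int)) : List (String × Int) :=
  item_sorter.foldl (fun acc item =>
      match PySem.List.pyGet? item_sorter 0 with
      | some h => if item.2 == h.2 then acc ++ [item] else acc
      | none => acc) []

def non_repeating (s : String) : List (String × Int) :=
  let t := PySem.Str.lower (PySem.Str.replace s " " "")
  let char_count : PySem.Dict String Int :=
    t.toList.foldl (fun d c =>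
      if d.contains (String.singleton c) then
        d.modify (String.singleton c) 0 (· + 1)
      else
        d.insert (String.singleton c) 1) PySem.Dict.empty
  let item_sorter := PySem.List.sorted char_count.items (fun x => x.2) false
  let uniques := pvLoopA item_sorter
  uniques

-- ===== PORT B =====
def non_repeating_alt (s : String) : List (String × Int) :=
  let t := PySem.Str.lower (PySem.Str.replace s " " "")
  let char_count : PySem.Dict String Int :=
    t.toList.foldl (fun d c =>
      d.insert (String.singleton c) (d.getD (String.singleton c) 0 + 1)) PySem.Dict.empty
  match PySem.List.min? char_count.values (fun v => v) with
  | none => []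
  | some m => char_count.items.filter (fun p => p.2 == m)

-- ===== PRECONDITION & SPEC =====
def Spec_non_repeating (s : String) (out : List (String × Int)) : Prop := out = non_repeating_alt s
instance (s : String) (out : List (String × Int)) : Decidable (Spec_non_repeating s out) := by unfold Spec_non_repeating; infer_instance

-- ===== CLAIM (what is proved, stated in full; the proofs are below) =====
def Claim_equal_non_repeating : Prop := ∀ (s : String), Dom_non_repeating s → Spec_non_repeating s (non_repeating s)

-- ===== LEMMAS AND PROOFS =====

-- A's counting step (membership test, then += / = 1) equals B's get-default step.
theorem pv_step_eq (d : PySem.Dict String Int) (k : String) :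
    (if d.contains k then d.modify k 0 (· + 1) else d.insert k 1)
      = d.insert k (d.getD k 0 + 1) := by
  by_cases h : d.contains k = true
  · simp [h, PySem.Dict.modify]
  · have hfind : List.find? (fun p => p.1 == k) d.items = none := by
      rw [List.find?_eq_none]
      intro p hp
      simp only [PySem.Dict.contains, List.any_eq_true, not_exists] at h
      by_contra hc
      exact h p ⟨hp, by simpa using hc⟩
    have h0 : d.getD k 0 = 0 := by simp [PySem.Dict.getD, PySem.Dict.get?, hfind]
    simp [h, h0]

-- the two counting loops build the same dict
theorem pv_stepfun_eq :
    (fun (d : PySem.Dict String Int) (c : Char) =>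
        if d.contains (String.singleton c) then d.modify (String.singleton c) 0 (· + 1)
        else d.insert (String.singleton c) 1)
      = fun d c => d.insert (String.singleton c) (d.getD (String.singleton c) 0 + 1) := by
  funext d c
  exact pv_step_eq d (String.singleton c)

-- stable insertion preserves sortedness of the accumulator
theorem pv_ins_pairwise (x : String × Int) (ys : List (String × Int))
    (h : ys.Pairwise (fun a b => a.2 ≤ b.2)) :
    (PySem.List.insertBy (fun a b => decide (a.2 < b.2)) x ys).Pairwise (fun a b => a.2 ≤ b.2) := by
  induction ys with
  | nil => simp [PySem.List.insertBy]
  | cons y t ih =>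
    rw [List.pairwise_cons] at h
    obtain ⟨hy, ht⟩ := h
    simp only [PySem.List.insertBy]
    split_ifs with hlt
    · simp only [decide_eq_true_eq] at hlt
      refine List.Pairwise.cons ?_ (List.Pairwise.cons hy ht)
      intro z hz
      rcases List.mem_cons.mp hz with rfl | hz
      · exact le_of_lt hlt
      · exact le_trans (le_of_lt hlt) (hy z hz)
    · simp only [decide_eq_true_eq, not_lt] at hlt
      refine List.Pairwise.cons ?_ (ih ht)
      intro z hz
      rcases (PySem.List.mem_insertBy _ _ _ _).mp hz with rfl | hz
      · exact hlt
      · exact hy z hz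

-- stability: filtering by a fixed count after a stable insertion = filter first, new element last
theorem pv_ins_filter (c : Int) (x : String × Int) (ys : List (String × Int))
    (h : ys.Pairwise (fun a b => a.2 ≤ b.2)) :
    (PySem.List.insertBy (fun a b => decide (a.2 < b.2)) x ys).filter (fun p => p.2 == c)
      = ys.filter (fun p => p.2 == c) ++ (if x.2 == c then [x] else []) := by
  induction ys with
  | nil =>
    simp only [PySem.List.insertBy, List.filter_cons, List.filter_nil, List.nil_append]
  | cons y t ih =>
    rw [List.pairwise_cons] at h
    obtain ⟨hy, ht⟩ := h
    simp only [PySem.List.insertBy]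
    by_cases hlt : (decide (x.2 < y.2)) = true
    · rw [if_pos hlt]
      simp only [decide_eq_true_eq] at hlt
      by_cases hx : (x.2 == c) = true
      · have hnone : (y :: t).filter (fun p => p.2 == c) = [] := by
          rw [List.filter_eq_nil_iff]
          intro z hz
          have hxc : x.2 = c := by simpa using hx
          rcases List.mem_cons.mp hz with rfl | hz'
          · simp only [beq_iff_eq]; omega
          · have := hy z hz'; simp only [beq_iff_eq]; omega
        rw [List.filter_cons, if_pos hx, hnone, if_pos hx]
        rfl
      · rw [List.filter_cons, if_neg hx, if_neg hx, List.append_nil]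
    · rw [if_neg hlt]
      rw [List.filter_cons, List.filter_cons, ih ht]
      by_cases hyc : (y.2 == c) = true <;> simp [hyc]

theorem pv_fold_filter (c : Int) (xs : List (String × Int)) (acc : List (String × Int))
    (h : acc.Pairwise (fun a b => a.2 ≤ b.2)) :
    (xs.foldl (fun a x => PySem.List.insertBy (fun a b => decide (a.2 < b.2)) x a) acc).filter
        (fun p => p.2 == c)
      = acc.filter (fun p => p.2 == c) ++ xs.filter (fun p => p.2 == c) := by
  induction xs generalizing acc with
  | nil => simp
  | cons x xs ih =>
    rw [List.foldl_cons, ih _ (pv_ins_pairwise x acc h), pv_ins_filter c x acc h,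
      List.filter_cons]
    by_cases hx : (x.2 == c) = true <;> simp [hx]

-- filtering a stably count-sorted list by a fixed count gives the original-order filter
theorem pv_filter_sorted (c : Int) (l : List (String × Int)) :
    (PySem.List.sorted l (fun x => x.2) false).filter (fun p => p.2 == c)
      = l.filter (fun p => p.2 == c) := by
  rw [PySem.List.sorted_eq_foldl_insertBy, pv_fold_filter c l [] (by simp)]
  simp

-- core: A's sorted-head scan equals B's min-filter, for any dict item list
theorem pv_core (l : List (String × Int)) :
    pvLoopA (PySem.List.sorted l (fun x => x.2) false)
      = (match PySem.List.min? (List.map (fun x => x.2) l) (fun v => v) with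
         | none => []
         | some m => l.filter (fun p => p.2 == m)) := by
  unfold pvLoopA
  rcases hs : PySem.List.sorted l (fun x => x.2) false with _ | ⟨h, t⟩
  · have hl : l = [] := (PySem.List.sorted_eq_nil_iff l (fun x => x.2) false).mp hs
    subst hl
    simp [PySem.List.min?]
  · have hl : l ≠ [] := by
      intro hnil
      subst hnil
      simp [PySem.List.sorted] at hs
    have hmem_h : h ∈ l := (PySem.List.mem_sorted l (fun x => x.2) false h).mp
      (by rw [hs]; exact List.mem_cons_self ..)
    have hhead : ∀ y ∈ l, h.2 ≤ y.2 := PySem.List.key_head_sorted_le l (fun x => x.2) hs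
    rcases hm : PySem.List.min? (List.map (fun x => x.2) l) (fun v => v) with _ | m
    · rw [PySem.List.min?_eq_none_iff, List.map_eq_nil_iff] at hm
      exact absurd hm hl
    · have hmmem : m ∈ List.map (fun x => x.2) l := PySem.List.min?_mem hm
      obtain ⟨p, hp, hpm⟩ := List.mem_map.mp hmmem
      have hhm : h.2 = m := by
        have h1 : h.2 ≤ m := hpm ▸ hhead p hp
        have h2 : m ≤ h.2 := by
          simpa using PySem.List.min?_isMin hm h.2 (List.mem_map.mpr ⟨h, hmem_h, rfl⟩)
        omega
      have hget : PySem.List.pyGet? (h :: t) 0 = some h := by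
        simp [PySem.List.pyGet?, PySem.List.pyIdx?]
      rw [hget]
      dsimp only
      rw [PySem.List.foldl_append_if_eq_filter, ← hs, hhm, pv_filter_sorted m l]
      simp [hm]

-- ===== VERDICT (by name: the statement is the Claim_ definition above) =====
set_option maxHeartbeats 1000000 in
theorem non_repeating_spec : Claim_equal_non_repeating := by
  intro s _
  unfold Spec_non_repeating
  dsimp only [non_repeating, non_repeating_alt]
  simp only [pv_stepfun_eq, PySem.Dict.values]
  rw [pv_core]
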